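-- pv_equiv track=rewrite | github.com/TheTalkingWeed/RandomPythonCodes | kisFeladatok/alpSorted.py | isAlphabeticallySorted
-- ===== SOURCE A (Python) =====
-- def isAlphabeticallySorted(string):
--     words = string.split(" ")
--
--     temp = ""
--     temp2 = ""
--     for i in range(len(words)):
--         if len(words[i]) >= 3:
--             temp = list(words[i])
--             temp.remove('.') if '.' in temp else 1+1
--             temp2 = "".join([i for i in temp])
--
--             temp.sort()
--             if temp2 == "".join([i for i in temp]): return True
--
--     return False
-- ===== SOURCE B (Python) =====
-- def _scan_sorted(s):
--     # adjacent-pair scan: sorted iff every neighbour pair is non-decreasing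
--     return all(a <= b for a, b in zip(s, s[1:]))
--
--
-- def isAlphabeticallySorted(string):
--     return any(_scan_sorted(w.replace('.', '', 1))
--                for w in string.split(" ") if len(w) >= 3)
-- ===== Notes on version B (the rewrite author's own statement) =====
-- stated objective: faster
-- what changed: Replaces A's per-word sort-a-copy-and-compare test (with manual list/remove/join bookkeeping) with an any() over the split words that removes the first dot via replace(count=1) and checks sortedness by a single short-circuiting adjacent-pair scan.
import Mathlib
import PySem

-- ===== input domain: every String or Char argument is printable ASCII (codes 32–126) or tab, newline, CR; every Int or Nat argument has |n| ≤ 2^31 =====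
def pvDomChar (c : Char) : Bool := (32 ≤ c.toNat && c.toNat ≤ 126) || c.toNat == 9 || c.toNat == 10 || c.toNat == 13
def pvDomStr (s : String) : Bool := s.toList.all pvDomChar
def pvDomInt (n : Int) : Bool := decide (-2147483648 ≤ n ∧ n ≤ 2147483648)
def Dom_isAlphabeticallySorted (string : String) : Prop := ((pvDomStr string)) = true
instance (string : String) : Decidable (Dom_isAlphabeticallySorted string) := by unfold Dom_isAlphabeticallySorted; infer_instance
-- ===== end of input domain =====

-- B replaces A's sort-a-copy-and-compare test with an adjacent-pair scan after removing the first dot, in an idiomatic any/filter form.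

-- ===== PORT A =====
-- body of one loop iteration for a word that passed the length guard
def pvACond (word : List Char) : Bool :=
  let temp := word                                -- temp = list(words[i])
  -- temp.remove('.') if '.' in temp else 1+1
  let temp := if ('.' : Char) ∈ temp then (PySem.List.remove? temp '.').getD temp else temp
  -- temp2 = "".join([i for i in temp])
  let temp2 := PySem.Chars.join [] (temp.map (fun c => [c]))
  -- temp.sort()
  let tempS := PySem.List.sorted temp (fun c => c)
  -- if temp2 == "".join([i for i in temp]): return True
  decide (temp2 = PySem.Chars.join [] (tempS.map (fun c => [c])))

-- the for-loop over range(len(words)) with early return, as structural recursion over the words in order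
def pvAGo : List String → Bool
  | [] => false                                   -- loop ends: return False
  | w :: ws =>
    if 3 ≤ PySem.Str.len w then                   -- if len(words[i]) >= 3
      if pvACond w.toList then true else pvAGo ws
    else pvAGo ws

def isAlphabeticallySorted (string : String) : Bool :=
  -- words = string.split(" "); the separator is non-empty, so split? is always `some`
  pvAGo ((PySem.Str.split? string " ").getD [])

-- ===== PORT B =====
-- hand port of w.replace('.', '', 1): removes only the first '.'; exact for this
-- single-character pattern with count=1 (no other occurrence of '.' is touched)
def pvDropFirstDot : List Char → List Char
  | [] => []
  | c :: cs => if c = '.' then cs else c :: pvDropFirstDot cs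

-- _scan_sorted: all(a <= b for a, b in zip(s, s[1:]))
def pvScanSorted (cs : List Char) : Bool :=
  (cs.zip cs.tail).all (fun p => p.1 ≤ p.2)

def isAlphabeticallySorted_alt (string : String) : Bool :=
  (((PySem.Str.split? string " ").getD []).filter (fun w => 3 ≤ PySem.Str.len w)).any
    (fun w => pvScanSorted (pvDropFirstDot w.toList))

-- ===== PRECONDITION & SPEC =====
def Spec_isAlphabeticallySorted (string : String) (out : Bool) : Prop := out = isAlphabeticallySorted_alt string
instance (string : String) (out : Bool) : Decidable (Spec_isAlphabeticallySorted string out) := by unfold Spec_isAlphabeticallySorted; infer_instance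

-- ===== CLAIM (what is proved, stated in full; the proofs are below) =====
def Claim_equal_isAlphabeticallySorted : Prop := ∀ (string : String), Dom_isAlphabeticallySorted string → Spec_isAlphabeticallySorted string (isAlphabeticallySorted string)

-- ===== LEMMAS AND PROOFS =====

-- A's guarded remove-first-'.' equals B's recursive drop of the first '.'
theorem removeDot_eq (l : List Char) :
    (if ('.' : Char) ∈ l then (PySem.List.remove? l '.').getD l else l) = pvDropFirstDot l := by
  induction l with
  | nil => simp [pvDropFirstDot]
  | cons c cs ih =>
    by_cases hc : c = '.'
    · subst hc
      rw [if_pos (List.mem_cons_self), PySem.List.remove?_cons_self]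
      simp [pvDropFirstDot]
    · by_cases hm : ('.' : Char) ∈ cs
      · have ih' : cs.erase '.' = pvDropFirstDot cs := by
          rw [if_pos hm, PySem.List.remove?_eq_some_erase _ _ hm] at ih
          simpa using ih
        rw [if_pos (List.mem_cons_of_mem _ hm), PySem.List.remove?_cons_of_ne _ hc,
          PySem.List.remove?_eq_some_erase _ _ hm]
        simp [pvDropFirstDot, hc, ← ih']
      · have ih' : cs = pvDropFirstDot cs := by rw [if_neg hm] at ih; exact ih
        rw [if_neg (by simp only [List.mem_cons, hm, or_false]; exact Ne.symm hc)]
        simp [pvDropFirstDot, hc, ← ih']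

-- the adjacent-pair scan says exactly "pairwise non-decreasing"
theorem scanSorted_iff_pairwise (l : List Char) :
    pvScanSorted l = true ↔ l.Pairwise (· ≤ ·) := by
  induction l with
  | nil => simp [pvScanSorted]
  | cons a t ih =>
    cases t with
    | nil => simp [pvScanSorted]
    | cons b u =>
      have hstep : pvScanSorted (a :: b :: u) = ((a ≤ b : Bool) && pvScanSorted (b :: u)) := by
        simp [pvScanSorted]
      rw [hstep]
      constructor
      · intro h
        obtain ⟨h1, h2⟩ := Bool.and_eq_true_iff.mp h
        have hp : (b :: u).Pairwise (· ≤ ·) := ih.mp h2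
        refine List.Pairwise.cons ?_ hp
        intro x hx
        have hab : a ≤ b := by simpa using h1
        rcases List.mem_cons.mp hx with rfl | hxu
        · exact hab
        · exact le_trans hab (List.rel_of_pairwise_cons hp hxu)
      · intro h
        rcases List.pairwise_cons.mp h with ⟨hall, hp⟩
        exact Bool.and_eq_true_iff.mpr ⟨by simpa using hall b List.mem_cons_self, ih.mpr hp⟩

-- A's per-word test (word equals its sorted copy) equals B's scan
theorem sortTest_iff_scan (l : List Char) :
    (l = PySem.List.sorted l (fun c => c)) ↔ pvScanSorted l = true := by
  rw [scanSorted_iff_pairwise]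
  constructor
  · intro h
    have := PySem.List.sorted_pairwise l (fun c => c)
    rw [← h] at this
    simpa using this
  · intro h
    exact (PySem.List.sorted_eq_self_of_pairwise l (fun c => c) (by simpa using h)).symm

-- A's loop body equals B's per-word test
theorem cond_eq (l : List Char) : pvACond l = pvScanSorted (pvDropFirstDot l) := by
  simp only [pvACond, removeDot_eq, PySem.Chars.join_nil_singletons]
  by_cases hs : pvScanSorted (pvDropFirstDot l) = true
  · rw [hs]
    exact decide_eq_true ((sortTest_iff_scan _).mpr hs)
  · have hne : ¬(pvDropFirstDot l = PySem.List.sorted (pvDropFirstDot l) (fun c => c)) :=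
      fun h => hs ((sortTest_iff_scan _).mp h)
    simp only [Bool.not_eq_true] at hs
    rw [hs]
    exact decide_eq_false hne

-- the loop equals B's filter/any over the same words
theorem pvAGo_eq (ws : List String) :
    pvAGo ws = (ws.filter (fun w => 3 ≤ PySem.Str.len w)).any
      (fun w => pvScanSorted (pvDropFirstDot w.toList)) := by
  induction ws with
  | nil => simp [pvAGo]
  | cons w ws ih =>
    by_cases hlen : 3 ≤ PySem.Str.len w
    · rw [List.filter_cons, if_pos (by simpa using hlen), List.any_cons]
      simp only [pvAGo, if_pos hlen, cond_eq]
      by_cases hs : pvScanSorted (pvDropFirstDot w.toList) = true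
      · simp [hs]
      · simp only [Bool.not_eq_true] at hs
        simp [hs, ih]
    · rw [List.filter_cons, if_neg (by simpa using hlen)]
      simp only [pvAGo, if_neg hlen]
      exact ih

-- ===== VERDICT (by name: the statement is the Claim_ definition above) =====
theorem isAlphabeticallySorted_spec : Claim_equal_isAlphabeticallySorted := by
  intro s _
  unfold Spec_isAlphabeticallySorted isAlphabeticallySorted isAlphabeticallySorted_alt
  exact pvAGo_eq _
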